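-- pv_equiv track=rewrite | github.com/ryanlack616/howell-brain | howell_daemon.py | _compute_novelty_score
-- ===== SOURCE A (Python) =====
-- def _compute_novelty_score(session_data: dict, kg_ops: list) -> tuple:
--     """Score session novelty from KG ops + text signals.
--     Returns (score, new_entities, new_relations, new_observations)."""
--     new_entities    = sum(1 for op in kg_ops if op.get("type") in ("create_entity", "add_entity"))
--     new_relations   = sum(1 for op in kg_ops if op.get("type") in ("create_relation", "add_relation"))
--     new_observations= sum(1 for op in kg_ops if op.get("type") == "add_observation")
--     # Text fallback: word density of what_learned
--     text = (session_data.get("what_learned") or session_data.get("summary", ""))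
--     text_score = min(5, len(text.split()) // 50)  # 1 pt per 50 words, max 5
--     score = new_entities * 3 + new_relations * 2 + new_observations + text_score
--     return score, new_entities, new_relations, new_observations
-- ===== SOURCE B (Python) =====
-- def _compute_novelty_score(session_data: dict, kg_ops: list) -> tuple:
--     """Score session novelty from KG ops + text signals.
--     Returns (score, new_entities, new_relations, new_observations)."""
--     # Single fused pass: classify each op once and accumulate the weighted
--     # score together with the three counters, instead of three staged scans
--     # followed by a weighted-sum formula.
--     score = new_entities = new_relations = new_observations = 0
--     for op in kg_ops:
--         t = op.get("type")
--         if t in ("create_entity", "add_entity"):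
--             score += 3
--             new_entities += 1
--         elif t in ("create_relation", "add_relation"):
--             score += 2
--             new_relations += 1
--         elif t == "add_observation":
--             score += 1
--             new_observations += 1
--     text = session_data.get("what_learned") or session_data.get("summary", "")
--     score += min(5, len(text.split()) // 50)
--     return score, new_entities, new_relations, new_observations
-- ===== Notes on version B (the rewrite author's own statement) =====
-- stated objective: alternative
-- what changed: Replaces A's three staged filtered scans plus a final weighted-sum formula with a single fused classification pass that maintains four accumulators (running weighted score and the three counters) updated per op via an if/elif chain.
import Mathlib
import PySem

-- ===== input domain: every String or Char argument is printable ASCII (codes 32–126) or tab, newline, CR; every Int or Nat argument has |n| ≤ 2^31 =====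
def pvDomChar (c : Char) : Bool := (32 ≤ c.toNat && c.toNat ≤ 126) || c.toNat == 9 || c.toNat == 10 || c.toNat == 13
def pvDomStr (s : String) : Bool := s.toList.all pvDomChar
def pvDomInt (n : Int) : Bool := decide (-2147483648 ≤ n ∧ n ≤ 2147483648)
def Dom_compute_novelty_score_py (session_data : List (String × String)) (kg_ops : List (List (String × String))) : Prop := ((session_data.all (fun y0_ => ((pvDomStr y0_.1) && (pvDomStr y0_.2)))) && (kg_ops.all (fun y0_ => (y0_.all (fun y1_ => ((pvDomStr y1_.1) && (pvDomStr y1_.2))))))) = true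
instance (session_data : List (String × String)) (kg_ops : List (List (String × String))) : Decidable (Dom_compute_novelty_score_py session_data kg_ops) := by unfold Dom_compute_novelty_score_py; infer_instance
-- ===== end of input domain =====

-- B fuses A's three staged scans + weighted-sum formula into one classification
-- pass maintaining four accumulators; an alternative decomposition, not claimed faster.

-- ===== PORT A =====
-- op.get("type")  (shared helper: both Pythons compute it the same way)
def pvOpType (op : List (String × String)) : Option String :=
  (PySem.Dict.ofList op).get? "type"

-- text = session_data.get("what_learned") or session_data.get("summary", "")
-- (Python 'or': a None or empty-string first operand falls through to the second)
def pvText (session_data : List (String × String)) : String :=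
  let d := PySem.Dict.ofList session_data
  match d.get? "what_learned" with
  | some s => if s == "" then d.getD "summary" "" else s
  | none => d.getD "summary" ""

def compute_novelty_score_py (session_data : List (String × String)) (kg_ops : List (List (String × String))) : Int × Int × Int × Int :=
  let new_entities : Int := kg_ops.foldl (fun acc op =>
    if pvOpType op == some "create_entity" || pvOpType op == some "add_entity" then acc + 1 else acc) 0
  let new_relations : Int := kg_ops.foldl (fun acc op =>
    if pvOpType op == some "create_relation" || pvOpType op == some "add_relation" then acc + 1 else acc) 0
  let new_observations : Int := kg_ops.foldl (fun acc op =>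
    if pvOpType op == some "add_observation" then acc + 1 else acc) 0
  let text := pvText session_data
  let text_score : Int := min 5 (PySem.Int.floordiv (PySem.List.len (PySem.Str.split₀ text)) 50)
  let score := new_entities * 3 + new_relations * 2 + new_observations + text_score
  (score, new_entities, new_relations, new_observations)

-- ===== PORT B =====
-- one fused pass: per-op classification updating (score, entities, relations, observations)
def pvStep (acc : Int × Int × Int × Int) (op : List (String × String)) : Int × Int × Int × Int :=
  let t := pvOpType op
  if t == some "create_entity" || t == some "add_entity" then
    (acc.1 + 3, acc.2.1 + 1, acc.2.2.1, acc.2.2.2)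
  else if t == some "create_relation" || t == some "add_relation" then
    (acc.1 + 2, acc.2.1, acc.2.2.1 + 1, acc.2.2.2)
  else if t == some "add_observation" then
    (acc.1 + 1, acc.2.1, acc.2.2.1, acc.2.2.2 + 1)
  else acc

def compute_novelty_score_py_alt (session_data : List (String × String)) (kg_ops : List (List (String × String))) : Int × Int × Int × Int :=
  let acc := kg_ops.foldl pvStep (0, 0, 0, 0)
  let text := pvText session_data
  let text_score : Int := min 5 (PySem.Int.floordiv (PySem.List.len (PySem.Str.split₀ text)) 50)
  (acc.1 + text_score, acc.2.1, acc.2.2.1, acc.2.2.2)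

-- ===== PRECONDITION & SPEC =====
def Spec_compute_novelty_score_py (session_data : List (String × String)) (kg_ops : List (List (String × String))) (out : Int × Int × Int × Int) : Prop := out = compute_novelty_score_py_alt session_data kg_ops
instance (session_data : List (String × String)) (kg_ops : List (List (String × String))) (out : Int × Int × Int × Int) : Decidable (Spec_compute_novelty_score_py session_data kg_ops out) := by unfold Spec_compute_novelty_score_py; infer_instance

-- ===== CLAIM (what is proved, stated in full; the proofs are below) =====
def Claim_equal_compute_novelty_score_py : Prop := ∀ (session_data : List (String × String)) (kg_ops : List (List (String × String))), Dom_compute_novelty_score_py session_data kg_ops → Spec_compute_novelty_score_py session_data kg_ops (compute_novelty_score_py session_data kg_ops)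

-- ===== LEMMAS AND PROOFS =====

-- A's 'sum(1 for op if p op)' fold equals countP
lemma foldl_if_count {α : Type} (p : α → Bool) (l : List α) (c : Int) :
    l.foldl (fun acc x => if p x then acc + 1 else acc) c = c + (l.countP p : Int) := by
  induction l generalizing c with
  | nil => simp
  | cons x xs ih =>
    simp only [List.foldl_cons, List.countP_cons, ih]
    by_cases h : p x <;> simp [h] <;> try omega

def pE (op : List (String × String)) : Bool :=
  pvOpType op == some "create_entity" || pvOpType op == some "add_entity"
def pR (op : List (String × String)) : Bool :=
  pvOpType op == some "create_relation" || pvOpType op == some "add_relation"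
def pO (op : List (String × String)) : Bool :=
  pvOpType op == some "add_observation"

-- branch exclusivity: an op's type matches at most one classification
lemma disjE (x : List (String × String)) (h : pE x = true) : pR x = false ∧ pO x = false := by
  simp only [pE, Bool.or_eq_true, beq_iff_eq] at h
  rcases h with h | h <;> simp [pR, pO, h]

lemma disjR (x : List (String × String)) (h : pR x = true) : pO x = false := by
  simp only [pR, Bool.or_eq_true, beq_iff_eq] at h
  rcases h with h | h <;> simp [pO, h]

-- the fused fold in terms of the three counts
lemma fused_fold (l : List (List (String × String))) (s e r o : Int) :
    l.foldl pvStep (s, e, r, o)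
      = (s + 3 * (l.countP pE : Int) + 2 * (l.countP pR : Int) + (l.countP pO : Int),
         e + (l.countP pE : Int), r + (l.countP pR : Int), o + (l.countP pO : Int)) := by
  induction l generalizing s e r o with
  | nil => simp
  | cons x xs ih =>
    simp only [List.foldl_cons, List.countP_cons]
    show (xs.foldl pvStep (if pE x then (s + 3, e + 1, r, o)
        else if pR x then (s + 2, e, r + 1, o)
        else if pO x then (s + 1, e, r, o + 1) else (s, e, r, o))) = _
    by_cases hE : pE x
    · obtain ⟨hR0, hO0⟩ := disjE x hE
      simp only [hE, if_true, ih, hR0, hO0, Prod.mk.injEq]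
      simp; omega
    · by_cases hR : pR x
      · have hO0 := disjR x hR
        simp only [hE, hR, if_true, ih, hO0, Prod.mk.injEq]
        simp; omega
      · by_cases hO : pO x
        · simp only [hE, hR, hO, if_true, ih, Prod.mk.injEq]
          simp; omega
        · simp only [hE, hR, hO, ih, Prod.mk.injEq]
          simp

-- ===== VERDICT (by name: the statement is the Claim_ definition above) =====
theorem compute_novelty_score_py_spec : Claim_equal_compute_novelty_score_py := by
  intro sd ko _
  unfold Spec_compute_novelty_score_py compute_novelty_score_py compute_novelty_score_py_alt
  simp only [fused_fold]
  simp only [show (fun op => pvOpType op == some "create_entity" || pvOpType op == some "add_entity") = pE from rfl,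
             show (fun op => pvOpType op == some "create_relation" || pvOpType op == some "add_relation") = pR from rfl,
             show (fun op => pvOpType op == some "add_observation") = pO from rfl,
             foldl_if_count]
  ring_nf
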